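-- pv_equiv track=rewrite | github.com/panc86/drop | pipeline/transformers/text_geocoder/src/app/tags.py | parse_location_tags
-- ===== SOURCE A (Python) =====
-- from typing import Iterable
--
-- def parse_location_tags(
--     tokens: Iterable[Iterable[str]], tags: Iterable[Iterable[str]]
-- ) -> Iterable[dict]:
--     """
--     Filters tokens given a set of tags allowed by the user.
--     DeepPavlov NER algorithm uses prefixes to indicate B-egin,
--     and I-nside relative positions of tokens. For more details, visit
--     # http://docs.deeppavlov.ai/en/master/features/models/ner.html#ner-task.
--     """
--     ner = list()
--     b_tags = ["B-GPE", "B-FAC", "B-LOC"]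
--     i_tags = ["I-GPE", "I-FAC", "I-LOC"]
--
--     for cur_tokens, cur_tags in zip(tokens, tags):
--         pos = 0
--         loc = dict()
--         max_len = len(cur_tags)
--         while pos < max_len:
--             pos_token, pos_tag = cur_tokens[pos], cur_tags[pos]
--             # begin of location token
--             if pos_tag not in b_tags:
--                 pos += 1
--                 continue
--             # start building token from begin tag
--             token = pos_token
--             # scan next tags
--             next_pos = pos + 1
--             # stop if index reaches end or tag not in i_tags
--             # next tag could be I-<tag> or B-<tag>
--             # e.g. [["Russia", "China"]], [["B-GPE", "B-GPE"]]
--             while next_pos < max_len and cur_tags[next_pos] in i_tags: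
--                 # suffix to extend built token
--                 if cur_tokens[next_pos] != token:
--                     token = " ".join([token, cur_tokens[next_pos]])
--                 next_pos += 1
--             # cache built location token
--             hashtable = loc.setdefault(pos_tag[2:], list())
--             if token not in hashtable:
--                 hashtable.append(token)
--             # update pointer
--             pos = next_pos
--         ner.append(loc or None)
--     return ner
-- ===== SOURCE B (Python) =====
-- def parse_location_tags(tokens, tags):
--     """Single flat state-machine pass per sequence: keep the currently open
--     span (type, token) and flush it into loc when it closes."""
--     b_tags = ("B-GPE", "B-FAC", "B-LOC")
--     i_tags = ("I-GPE", "I-FAC", "I-LOC")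
--     ner = []
--     for cur_tokens, cur_tags in zip(tokens, tags):
--         loc = {}
--         open_type = None
--         open_token = ""
--         for i in range(len(cur_tags)):
--             word, tag = cur_tokens[i], cur_tags[i]
--             if tag in b_tags:
--                 if open_type is not None:
--                     bucket = loc.setdefault(open_type, [])
--                     if open_token not in bucket:
--                         bucket.append(open_token)
--                 open_type, open_token = tag[2:], word
--             elif tag in i_tags:
--                 if open_type is not None and word != open_token:
--                     open_token = open_token + " " + word
--             else:
--                 if open_type is not None:
--                     bucket = loc.setdefault(open_type, [])
--                     if open_token not in bucket:
--                         bucket.append(open_token)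
--                 open_type = None
--         if open_type is not None:
--             bucket = loc.setdefault(open_type, [])
--             if open_token not in bucket:
--                 bucket.append(open_token)
--         ner.append(loc or None)
--     return ner
-- ===== Notes on version B (the rewrite author's own statement) =====
-- stated objective: simpler
-- what changed: Replaces A's nested while loops with pointer jumps (outer scan for B-tags plus an inner scan consuming I-tags) by one flat state-machine pass per sequence that keeps the currently open span (type, token) and flushes it when it closes.
import Mathlib
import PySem

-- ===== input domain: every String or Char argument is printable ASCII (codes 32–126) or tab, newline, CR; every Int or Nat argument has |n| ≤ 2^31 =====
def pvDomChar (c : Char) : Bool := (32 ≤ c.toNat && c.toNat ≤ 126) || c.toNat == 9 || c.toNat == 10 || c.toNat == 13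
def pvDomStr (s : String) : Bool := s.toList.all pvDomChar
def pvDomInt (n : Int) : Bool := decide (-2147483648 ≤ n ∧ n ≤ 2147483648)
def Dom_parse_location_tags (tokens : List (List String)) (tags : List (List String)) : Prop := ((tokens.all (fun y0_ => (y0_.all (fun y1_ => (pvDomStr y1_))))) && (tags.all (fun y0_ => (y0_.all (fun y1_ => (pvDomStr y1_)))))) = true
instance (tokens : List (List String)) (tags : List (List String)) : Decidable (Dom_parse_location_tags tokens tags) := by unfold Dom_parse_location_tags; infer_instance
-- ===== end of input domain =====

-- B replaces A's nested while loops (outer B-tag scan + inner I-tag scan with a pointer jump)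
-- by one flat state-machine pass keeping the currently open span; objective: simpler.

-- ===== PORT A =====
def pvBTags : List String := ["B-GPE", "B-FAC", "B-LOC"]
def pvITags : List String := ["I-GPE", "I-FAC", "I-LOC"]

-- hashtable = loc.setdefault(pos_tag[2:], list()); if token not in hashtable: hashtable.append(token)
-- (both Pythons contain exactly this flush code)
def pvFlush (loc : PySem.Dict String (List String)) (t token : String) : PySem.Dict String (List String) :=
  let d := loc.setdefault t []
  let ht := d.getD t []
  if token ∈ ht then d else d.insert t (ht ++ [token])

-- inner while of A: consume (token, tag) pairs while the tag is an I-tag, extending the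
-- built token; returns the unconsumed suffix (= pointer next_pos) and the built token.
-- On Pre_ the index loop 'while next_pos < max_len' is exactly this walk down the zipped suffix.
def pvAInner (token : String) : List (String × String) → List (String × String) × String
  | [] => ([], token)
  | (word, tag) :: rest =>
    if tag ∈ pvITags then
      pvAInner (if word ≠ token then token ++ " " ++ word else token) rest
    else ((word, tag) :: rest, token)

theorem pvAInner_len (token : String) (l : List (String × String)) :
    (pvAInner token l).1.length ≤ l.length := by
  induction l generalizing token with
  | nil => simp [pvAInner]
  | cons p rest ih =>
    obtain ⟨word, tag⟩ := p
    by_cases h : tag ∈ pvITags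
    · simp only [pvAInner, if_pos h]
      exact le_trans (ih _) (Nat.le_succ _)
    · simp [pvAInner, if_neg h]

-- outer while of A: scan for a B-tag, build the span with pvAInner, flush it, jump the
-- pointer to the unconsumed suffix
def pvAOuter (loc : PySem.Dict String (List String)) :
    List (String × String) → PySem.Dict String (List String)
  | [] => loc
  | (word, tag) :: rest =>
    if tag ∈ pvBTags then
      pvAOuter (pvFlush loc (PySem.Str.slice tag (some 2) none) (pvAInner word rest).2)
        (pvAInner word rest).1
    else pvAOuter loc rest
  termination_by l => l.length
  decreasing_by
  · exact Nat.lt_succ_of_le (pvAInner_len word rest)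
  · exact Nat.lt_succ_self _

def parse_location_tags (tokens : List (List String)) (tags : List (List String)) :
    List (Option (List (String × List String))) :=
  (tokens.zip tags).map (fun p =>
    let loc := pvAOuter PySem.Dict.empty (p.1.zip p.2)  -- on Pre_, len(cur_tokens) ≥ max_len = len(cur_tags)
    if loc.items = [] then none else some loc.items)  -- loc or None

-- ===== PORT B =====
-- flat for-loop of B; state = (loc, open span (type, token) or none); one step per pair
def pvBLoop (loc : PySem.Dict String (List String)) (op : Option (String × String)) :
    List (String × String) → PySem.Dict String (List String)
  | [] => match op with | none => loc | some (t, tok) => pvFlush loc t tok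
  | (word, tag) :: rest =>
    if tag ∈ pvBTags then
      pvBLoop (match op with | none => loc | some (t, tok) => pvFlush loc t tok)
        (some (PySem.Str.slice tag (some 2) none, word)) rest
    else if tag ∈ pvITags then
      pvBLoop loc
        (match op with
         | none => none
         | some (t, tok) => some (t, if word ≠ tok then tok ++ " " ++ word else tok)) rest
    else
      pvBLoop (match op with | none => loc | some (t, tok) => pvFlush loc t tok) none rest

def parse_location_tags_alt (tokens : List (List String)) (tags : List (List String)) :
    List (Option (List (String × List String))) :=
  (tokens.zip tags).map (fun p =>
    let loc := pvBLoop PySem.Dict.empty none (p.1.zip p.2)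
    if loc.items = [] then none else some loc.items)

-- ===== PRECONDITION & SPEC =====
-- Pre_ excludes exactly the inputs on which A raises IndexError: a zipped pair whose
-- tag sequence is longer than its token sequence (A indexes cur_tokens at every tag position).
def Pre_parse_location_tags (tokens : List (List String)) (tags : List (List String)) : Prop :=
  ∀ p ∈ tokens.zip tags, p.2.length ≤ p.1.length
instance (tokens : List (List String)) (tags : List (List String)) : Decidable (Pre_parse_location_tags tokens tags) := by unfold Pre_parse_location_tags; infer_instance

def pvWitness_parse_location_tags : List (List String) × List (List String) :=
  ([["Paris", "is", "in", "France", "x"]], [["B-GPE", "O", "O", "B-GPE", "I-GPE"]])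

def Spec_parse_location_tags (tokens : List (List String)) (tags : List (List String)) (out : List (Option (List (String × List String)))) : Prop := out = parse_location_tags_alt tokens tags
instance (tokens : List (List String)) (tags : List (List String)) (out : List (Option (List (String × List String)))) : Decidable (Spec_parse_location_tags tokens tags out) := by unfold Spec_parse_location_tags; infer_instance

-- ===== CLAIM (what is proved, stated in full; the proofs are below) =====
def Claim_equal_parse_location_tags : Prop := ∀ (tokens : List (List String)) (tags : List (List String)), Dom_parse_location_tags tokens tags → Pre_parse_location_tags tokens tags → Spec_parse_location_tags tokens tags (parse_location_tags tokens tags)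

-- ===== LEMMAS AND PROOFS =====

theorem pvNotB_of_I {s : String} (h : s ∈ pvITags) : s ∉ pvBTags := by
  fin_cases h <;> decide

-- running B's loop with an open span equals scanning the span to its end (A's inner loop),
-- flushing it, and continuing with no open span
theorem pvBLoop_some (l : List (String × String)) (t tok : String)
    (loc : PySem.Dict String (List String)) :
    pvBLoop loc (some (t, tok)) l =
      pvBLoop (pvFlush loc t (pvAInner tok l).2) none (pvAInner tok l).1 := by
  induction l generalizing tok loc with
  | nil => simp [pvBLoop, pvAInner]
  | cons p rest ih =>
    obtain ⟨word, tag⟩ := p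
    by_cases hi : tag ∈ pvITags
    · rw [pvBLoop, if_neg (pvNotB_of_I hi), if_pos hi]
      rw [pvAInner, if_pos hi]
      exact ih _ _
    · rw [pvAInner, if_neg hi]
      by_cases hb : tag ∈ pvBTags
      · conv_lhs => rw [pvBLoop]
        conv_rhs => rw [pvBLoop]
        rw [if_pos hb, if_pos hb]
      · conv_lhs => rw [pvBLoop]
        conv_rhs => rw [pvBLoop]
        rw [if_neg hb, if_neg hb, if_neg hi, if_neg hi]

-- A's outer loop equals B's flat loop with no open span
theorem pvAOuter_eq_pvBLoop (l : List (String × String))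
    (loc : PySem.Dict String (List String)) :
    pvAOuter loc l = pvBLoop loc none l := by
  fun_induction pvAOuter loc l with
  | case1 loc => rfl
  | case2 loc word tag rest hb ih =>
    rw [pvBLoop, if_pos hb, pvBLoop_some]
    exact ih
  | case3 loc word tag rest hb ih =>
    rw [pvBLoop, if_neg hb]
    by_cases hi : tag ∈ pvITags
    · rw [if_pos hi]; exact ih
    · rw [if_neg hi]; exact ih

-- ===== VERDICT (by name: the statement is the Claim_ definition above) =====
theorem parse_location_tags_spec : Claim_equal_parse_location_tags := by
  intro tokens tags _ _
  unfold Spec_parse_location_tags parse_location_tags parse_location_tags_alt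
  refine List.map_congr_left ?_
  intro p _
  rw [pvAOuter_eq_pvBLoop]
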